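-- pv_equiv track=rewrite | github.com/kemalsfs/Blackjack_day11 | main.py | check_21
-- ===== SOURCE A (Python) =====
-- def check_21(hand):
--     total = 0
--     ace = 0
--     for i in hand:
--         total += i
--         if i == 11:
--             ace += 1
--     if total > 21 and ace == 0:
--         return False
--     elif total > 21 and ace > 0:
--         while not ace == 0:
--             for i in hand:
--                 if i == 11:
--                     hand.remove(i)
--                     hand.append(1)
--                     ace -= 1
--                     total_2 = 0
--                     for j in hand:
--                         total_2 += j
--                     if total_2 <= 21:
--                         return True
--         total_3 = 0
--         for i in hand:
--             total_3 += i
--         if total_3 <= 21: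
--             return True
--     else:
--         return True
-- ===== SOURCE B (Python) =====
-- def check_21(hand):
--     # Closed form: demoting an ace (11) to 1 lowers the total by exactly 10,
--     # so the hand is playable iff total - 10*aces <= 21 (checking aces one by one
--     # is unnecessary).  Unlike A, this does not mutate `hand`.
--     total = sum(hand)
--     aces = hand.count(11)
--     if total <= 21:
--         return True
--     if aces == 0:
--         return False
--     if total - 10 * aces <= 21:
--         return True
--     # like A, fall through (-> None) when the hand busts even with every ace demoted
-- ===== Notes on version B (the rewrite author's own statement) =====
-- stated objective: simpler
-- what changed: Replaces A's in-place ace-removal simulation (while loop repeatedly scanning, remove/append-mutating and fully re-summing the hand) by a closed-form comparison of sum(hand) and the ace count computed once; B does not mutate its argument.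
import Mathlib
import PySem

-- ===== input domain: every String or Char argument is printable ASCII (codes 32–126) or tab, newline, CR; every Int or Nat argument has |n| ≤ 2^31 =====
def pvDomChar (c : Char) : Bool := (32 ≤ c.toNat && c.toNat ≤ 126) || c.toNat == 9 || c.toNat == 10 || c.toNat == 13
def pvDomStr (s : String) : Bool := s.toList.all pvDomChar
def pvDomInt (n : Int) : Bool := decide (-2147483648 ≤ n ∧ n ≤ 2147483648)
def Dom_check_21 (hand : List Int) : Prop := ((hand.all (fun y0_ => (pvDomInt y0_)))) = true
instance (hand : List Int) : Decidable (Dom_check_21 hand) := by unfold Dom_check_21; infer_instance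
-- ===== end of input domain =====

-- B replaces A's in-place ace-demotion simulation by a closed-form comparison.
-- NOTE: the Python A MUTATES its argument in place (hand.remove/hand.append) and B does
-- not; the equivalence proved here is about the RETURN value only.

-- ===== PORT A =====
-- result of one run of the inner 'for i in hand' loop: early 'return True' or fall through
inductive PassRes
  | ret : PassRes
  | cont : List Int → Int → PassRes
deriving DecidableEq, Repr

-- one run of the inner 'for i in hand': Python's for walks the (mutating) list by index;
-- remove-then-append keeps the length constant, so fuel = hand.length - idx suffices and
-- the fuel-0 fallthrough is unreachable (a guard making the recursion structural).
-- hand.remove(i) cannot raise here since i = hand[idx] is in hand.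
def forPass : Nat → List Int → Nat → Int → PassRes
  | 0, hand, _, ace => .cont hand ace
  | fuel + 1, hand, idx, ace =>
    if h : idx < hand.length then
      if hand[idx] = (11 : Int) then
        let hand' := (PySem.List.remove? hand hand[idx]).getD hand ++ [1]
        if hand'.foldl (fun a j => a + j) 0 ≤ 21 then .ret
        else forPass fuel hand' (idx + 1) (ace - 1)
      else forPass fuel hand (idx + 1) ace
    else .cont hand ace

-- the 'while not ace == 0' loop plus the trailing total_3 check of that branch; every
-- iteration with ace ≠ 0 lowers ace (ace counts the 11s left), so fuel = ace.toNat
-- suffices and the fuel-0 branch is unreachable (a guard making the recursion structural)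
def whileLoop (fuel : Nat) (hand : List Int) (ace : Int) : Option Bool :=
  if ace = 0 then
    if hand.foldl (fun a i => a + i) 0 ≤ 21 then some true else none
  else
    match fuel with
    | 0 => none
    | fuel' + 1 =>
      match forPass hand.length hand 0 ace with
      | .ret => some true
      | .cont hand' ace' => whileLoop fuel' hand' ace'

def check_21 (hand : List Int) : Option Bool :=
  let p := hand.foldl (fun (p : Int × Int) i => (p.1 + i, if i = 11 then p.2 + 1 else p.2)) (0, 0)
  if p.1 > 21 ∧ p.2 = 0 then some false
  else if p.1 > 21 ∧ p.2 > 0 then whileLoop p.2.toNat hand p.2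
  else some true

-- ===== PORT B =====
def check_21_alt (hand : List Int) : Option Bool :=
  let total := hand.sum
  let aces := (hand.count 11 : Int)
  if total ≤ 21 then some true
  else if aces = 0 then some false
  else if total - 10 * aces ≤ 21 then some true
  else none  -- like A, B falls off the end (None) when even demoting every ace busts

-- ===== PRECONDITION & SPEC =====
def Spec_check_21 (hand : List Int) (out : Option Bool) : Prop := out = check_21_alt hand
instance (hand : List Int) (out : Option Bool) : Decidable (Spec_check_21 hand out) := by unfold Spec_check_21; infer_instance

-- ===== CLAIM (what is proved, stated in full; the proofs are below) =====
def Claim_equal_check_21 : Prop := ∀ (hand : List Int), Dom_check_21 hand → Spec_check_21 hand (check_21 hand)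

-- ===== LEMMAS AND PROOFS =====
theorem pvFoldSum (l : List Int) (a : Int) :
    l.foldl (fun x y => x + y) a = a + l.sum := by
  induction l generalizing a with
  | nil => simp
  | cons x xs ih => simp only [List.foldl_cons, List.sum_cons, ih]; ring

theorem pvFoldPair (l : List Int) (t a : Int) :
    l.foldl (fun (p : Int × Int) i => (p.1 + i, if i = 11 then p.2 + 1 else p.2)) (t, a)
      = (t + l.sum, a + (l.count 11 : Int)) := by
  induction l generalizing t a with
  | nil => simp
  | cons x xs ih =>
      simp only [List.foldl_cons, List.sum_cons, List.count_cons, ih]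
      by_cases h : x = 11 <;> refine Prod.ext ?_ ?_ <;> simp [h] <;> push_cast <;> ring

-- facts about the mutated hand:  remove(11) then append(1)
theorem pvRA_eq (hand : List Int) (hm : (11 : Int) ∈ hand) :
    (PySem.List.remove? hand 11).getD hand ++ [(1 : Int)] = hand.erase 11 ++ [1] := by
  rw [PySem.List.remove?_eq_some_erase hand 11 hm]; rfl

theorem pvRA_length (hand : List Int) (hm : (11 : Int) ∈ hand) :
    ((PySem.List.remove? hand 11).getD hand ++ [(1 : Int)]).length = hand.length := by
  rw [pvRA_eq hand hm]
  have h1 := List.length_erase_of_mem hm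
  have h2 : 0 < hand.length := List.length_pos_of_mem hm
  simp only [List.length_append, List.length_cons, List.length_nil, h1]
  omega

theorem pvRA_sum (hand : List Int) (hm : (11 : Int) ∈ hand) :
    ((PySem.List.remove? hand 11).getD hand ++ [(1 : Int)]).sum = hand.sum - 10 := by
  rw [pvRA_eq hand hm]
  have h1 : (11 : Int) + (hand.erase 11).sum = hand.sum := List.sum_erase hm
  simp only [List.sum_append, List.sum_cons, List.sum_nil]
  omega

theorem pvRA_count (hand : List Int) (hm : (11 : Int) ∈ hand) :
    (((PySem.List.remove? hand 11).getD hand ++ [(1 : Int)]).count 11 : Int)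
      = (hand.count 11 : Int) - 1 := by
  rw [pvRA_eq hand hm]
  have h1 : (hand.erase 11).count 11 = hand.count 11 - 1 := List.count_erase_self
  have h2 : 0 < hand.count 11 := List.count_pos_iff.mpr hm
  rw [List.count_append, h1]
  have h3 : List.count (11 : Int) [(1 : Int)] = 0 := by decide
  rw [h3]
  omega

-- invariants of one pass: ace keeps counting the 11s, the sum drops 10 per removal,
-- and a pass that removes nothing saw no 11 from idx on
theorem pv_fp_cont (fuel : Nat) : ∀ (hand : List Int) (idx : Nat) (ace hand' ace' : _),
    hand.length ≤ fuel + idx → (hand.count 11 : Int) = ace → hand.sum > 21 →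
    forPass fuel hand idx ace = .cont hand' ace' →
      (hand'.count 11 : Int) = ace' ∧ hand'.sum = hand.sum - 10 * (ace - ace') ∧
      ace' ≤ ace ∧ hand'.sum > 21 ∧
      (ace' = ace → ∀ j, idx ≤ j → (hj : j < hand.length) → hand[j] ≠ 11) := by
  induction fuel with
  | zero =>
      intro hand idx ace hand' ace' hlen hc hs heq
      cases heq
      exact ⟨hc, by ring, le_refl _, hs, fun _ j hij hj => absurd hj (by omega)⟩
  | succ fuel ih =>
      intro hand idx ace hand' ace' hlen hc hs heq
      rw [forPass] at heq
      by_cases h : idx < hand.length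
      · rw [dif_pos h] at heq
        by_cases h11 : hand[idx] = (11 : Int)
        · rw [if_pos h11] at heq
          have hm : (11 : Int) ∈ hand := h11 ▸ List.getElem_mem h
          rw [h11] at heq
          by_cases ht :
              ((PySem.List.remove? hand 11).getD hand ++ [(1:Int)]).foldl (fun a j => a + j) 0 ≤ 21
          · rw [if_pos ht] at heq; simp at heq
          · rw [if_neg ht] at heq
            rw [pvFoldSum, pvRA_sum hand hm] at ht
            have hs' : ((PySem.List.remove? hand 11).getD hand ++ [(1:Int)]).sum > 21 := by
              rw [pvRA_sum hand hm]; omega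
            obtain ⟨c1, c2, c3, c4, c5⟩ :=
              ih _ (idx + 1) (ace - 1) hand' ace'
                (by rw [pvRA_length hand hm]; omega)
                (by rw [pvRA_count hand hm, hc]) hs' heq
            refine ⟨c1, by rw [c2, pvRA_sum hand hm]; ring, by omega, c4, fun hae => ?_⟩
            exact absurd hae (by omega)
        · rw [if_neg h11] at heq
          obtain ⟨c1, c2, c3, c4, c5⟩ := ih hand (idx + 1) ace hand' ace' (by omega) hc hs heq
          refine ⟨c1, c2, c3, c4, fun hae j hij hj => ?_⟩
          rcases Nat.eq_or_lt_of_le hij with hj' | hj'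
          · exact hj' ▸ h11
          · exact c5 hae j hj' hj
      · rw [dif_neg h] at heq
        cases heq
        exact ⟨hc, by ring, le_refl _, hs, fun _ j hij hj => absurd hj (by omega)⟩

-- a pass that returns True reached a total ≤ 21 after m ≥ 1 removals, so even demoting
-- every remaining 11 keeps the total ≤ 21
theorem pv_fp_ret (fuel : Nat) : ∀ (hand : List Int) (idx : Nat) (ace : Int),
    (hand.count 11 : Int) = ace → forPass fuel hand idx ace = .ret →
    hand.sum - 10 * ace ≤ 21 := by
  induction fuel with
  | zero => intro hand idx ace hc heq; simp [forPass] at heq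
  | succ fuel ih =>
      intro hand idx ace hc heq
      rw [forPass] at heq
      by_cases h : idx < hand.length
      · rw [dif_pos h] at heq
        by_cases h11 : hand[idx] = (11 : Int)
        · rw [if_pos h11] at heq
          have hm : (11 : Int) ∈ hand := h11 ▸ List.getElem_mem h
          have hcnt : 0 < hand.count 11 := List.count_pos_iff.mpr hm
          rw [h11] at heq
          by_cases ht :
              ((PySem.List.remove? hand 11).getD hand ++ [(1:Int)]).foldl (fun a j => a + j) 0 ≤ 21
          · rw [pvFoldSum, pvRA_sum hand hm] at ht
            have h1 : (1 : Int) ≤ (hand.count 11 : Int) := by exact_mod_cast hcnt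
            omega
          · rw [if_neg ht] at heq
            have := ih _ (idx + 1) (ace - 1) (by rw [pvRA_count hand hm, hc]) heq
            rw [pvRA_sum hand hm] at this
            omega
        · rw [if_neg h11] at heq
          exact ih hand (idx + 1) ace hc heq
      · rw [dif_neg h] at heq; simp at heq

-- the whole while-branch in closed form
theorem pv_wl_eq (fuel : Nat) : ∀ (hand : List Int) (ace : Int),
    (hand.count 11 : Int) = ace → hand.sum > 21 → ace.toNat ≤ fuel →
    whileLoop fuel hand ace = if hand.sum - 10 * ace ≤ 21 then some true else none := by
  induction fuel with
  | zero =>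
      intro hand ace hc hs hf
      have h0 : (0 : Int) ≤ ace := hc ▸ Int.natCast_nonneg _
      have hace : ace = 0 := by omega
      subst hace
      rw [whileLoop, if_pos rfl, pvFoldSum, if_neg (by omega), if_neg (by omega)]
  | succ fuel ih =>
      intro hand ace hc hs hf
      rw [whileLoop]
      by_cases hace : ace = 0
      · subst hace
        rw [if_pos rfl, pvFoldSum, if_neg (by omega), if_neg (by omega)]
      · rw [if_neg hace]
        cases hp : forPass hand.length hand 0 ace with
        | ret =>
            rw [if_pos (pv_fp_ret hand.length hand 0 ace hc hp)]
        | cont hand' ace' =>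
            obtain ⟨c1, c2, c3, c4, c5⟩ :=
              pv_fp_cont hand.length hand 0 ace hand' ace' (by omega) hc hs hp
            have hlt : ace' < ace := by
              rcases lt_or_eq_of_le c3 with hlt | heqa
              · exact hlt
              · exfalso
                have h11 : (11 : Int) ∉ hand := by
                  intro hm
                  obtain ⟨j, hj, hv⟩ := List.getElem_of_mem hm
                  exact c5 heqa j (Nat.zero_le j) hj hv
                have : hand.count 11 = 0 := List.count_eq_zero.mpr h11
                rw [this] at hc
                exact hace (by exact_mod_cast hc.symm)
            have h0' : (0 : Int) ≤ ace' := c1 ▸ Int.natCast_nonneg _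
            show whileLoop fuel hand' ace' = if hand.sum - 10 * ace ≤ 21 then some true else none
            rw [ih hand' ace' c1 c4 (by omega)]
            have harith : hand'.sum - 10 * ace' = hand.sum - 10 * ace := by rw [c2]; ring
            rw [harith]

-- A's result in closed form
theorem check_21_eval (hand : List Int) :
    check_21 hand = if hand.sum ≤ 21 then some true
      else if hand.count 11 = 0 then some false
      else if hand.sum - 10 * (hand.count 11 : Int) ≤ 21 then some true else none := by
  unfold check_21
  simp only [pvFoldPair, zero_add]
  have hc0 : (0 : Int) ≤ (hand.count 11 : Int) := Int.natCast_nonneg _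
  by_cases hs : hand.sum ≤ 21
  · rw [if_neg (fun h => absurd h.1 (by omega)), if_neg (fun h => absurd h.1 (by omega)),
      if_pos hs]
  · by_cases h0 : hand.count 11 = 0
    · rw [if_pos ⟨by omega, by exact_mod_cast h0⟩, if_neg hs, if_pos h0]
    · have hpos : 0 < hand.count 11 := Nat.pos_of_ne_zero h0
      have hposi : (0 : Int) < (hand.count 11 : Int) := by exact_mod_cast hpos
      rw [if_neg (fun h => absurd h.2 (by omega)), if_pos ⟨by omega, hposi⟩]
      rw [pv_wl_eq _ hand _ rfl (by omega) (le_refl _), if_neg hs, if_neg h0]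

-- ===== VERDICT (by name: the statement is the Claim_ definition above) =====
theorem check_21_spec : Claim_equal_check_21 := by
  intro hand _
  unfold Spec_check_21 check_21_alt
  rw [check_21_eval]
  by_cases hs : hand.sum ≤ 21
  · rw [if_pos hs, if_pos hs]
  · rw [if_neg hs, if_neg hs]
    by_cases h0 : hand.count 11 = 0
    · rw [if_pos h0, if_pos (by exact_mod_cast h0 : (hand.count 11 : Int) = 0)]
    · rw [if_neg h0, if_neg (by exact_mod_cast h0 : ¬ (hand.count 11 : Int) = 0)]
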